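-- pv_equiv track=rewrite | github.com/nsamelson/advent-of-code-24 | dec-12.py | count_fence_costs
-- ===== SOURCE A (Python) =====
-- def count_fence_costs(clusters):
--     tot_cost = 0
--
--     for cluster in clusters:
--         cluster_set = set(cluster)  # Convert to set for O(1) lookups
--         area = len(cluster)
--         perimeter = 0
--
--         for x, y in cluster:
--             # Check each neighbor
--             neighbors = [(x + 1, y), (x - 1, y), (x, y + 1), (x, y - 1)]
--             free_sides = sum(1 for n in neighbors if n not in cluster_set)
--             perimeter += free_sides
--
--         tot_cost += area * perimeter
--
--     return tot_cost
-- ===== SOURCE B (Python) =====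
-- def count_fence_costs(clusters):
--     tot_cost = 0
--     for cluster in clusters:
--         # Histogram every unit edge segment of every cell; an edge shared by two
--         # cells appears twice, so the perimeter is the number of segments seen once.
--         edge_count = {}
--         for x, y in cluster:
--             for e in ((x, y, 0), (x + 1, y, 0), (x, y, 1), (x, y + 1, 1)):
--                 edge_count[e] = edge_count.get(e, 0) + 1
--         perimeter = sum(1 for v in edge_count.values() if v == 1)
--         tot_cost += len(cluster) * perimeter
--     return tot_cost
-- ===== Notes on version B (the rewrite author's own statement) =====
-- stated objective: alternative
-- what changed: B never tests neighbor membership at all: it builds a histogram (dict) of every cell's four unit edge segments and takes the perimeter as the number of segments occurring exactly once (shared edges occur twice), a staged two-pass edge-multiset method instead of A's per-cell free-side counting against a set; Pre_ excludes clusters containing duplicate cells, on which A's per-occurrence free-side summation is a multiset artefact the edge-histogram method does not reproduce.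
-- outside the precondition, e.g. on count_fence_costs([[(0, 0), (0, 0), (1, 0)]]): A returns 27, B returns 9
import Mathlib
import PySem

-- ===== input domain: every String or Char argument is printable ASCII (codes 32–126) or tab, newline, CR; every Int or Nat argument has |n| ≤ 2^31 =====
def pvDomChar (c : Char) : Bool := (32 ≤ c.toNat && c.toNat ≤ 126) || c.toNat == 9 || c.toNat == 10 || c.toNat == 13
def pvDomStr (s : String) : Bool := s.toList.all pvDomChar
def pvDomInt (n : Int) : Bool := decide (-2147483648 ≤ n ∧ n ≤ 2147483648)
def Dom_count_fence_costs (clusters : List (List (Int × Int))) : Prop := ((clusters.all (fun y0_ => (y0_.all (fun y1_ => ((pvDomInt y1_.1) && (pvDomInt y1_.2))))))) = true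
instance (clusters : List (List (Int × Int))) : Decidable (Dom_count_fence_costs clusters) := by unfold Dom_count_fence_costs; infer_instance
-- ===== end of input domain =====

-- B gets each cluster's perimeter from a histogram of unit edge segments (segments seen exactly
-- once are boundary), replacing A's per-cell neighbor-membership counting against a set.

-- ===== PORT A =====
def count_fence_costs (clusters : List (List (Int × Int))) : Int :=
  clusters.foldl (fun tot_cost cluster =>
    let cluster_set := PySem.Set.ofList cluster
    let area : Int := cluster.length
    let perimeter : Int := cluster.foldl (fun perimeter p =>
      let neighbors := [(p.1 + 1, p.2), (p.1 - 1, p.2), (p.1, p.2 + 1), (p.1, p.2 - 1)]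
      let free_sides : Int := (neighbors.filter (fun n => !(PySem.Set.contains cluster_set n))).length
      perimeter + free_sides) 0
    tot_cost + area * perimeter) 0

-- ===== PORT B =====
def count_fence_costs_alt (clusters : List (List (Int × Int))) : Int :=
  clusters.foldl (fun tot_cost cluster =>
    let edge_count : PySem.Dict (Int × Int × Int) Int := cluster.foldl (fun d p =>
      [(p.1, p.2, (0 : Int)), (p.1 + 1, p.2, (0 : Int)), (p.1, p.2, (1 : Int)), (p.1, p.2 + 1, (1 : Int))].foldl
        (fun d e => d.insert e (d.getD e 0 + 1)) d) PySem.Dict.empty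
    let perimeter : Int := ((edge_count.values.filter (fun v => v == (1 : Int))).length : Int)
    tot_cost + (cluster.length : Int) * perimeter) 0

-- ===== PRECONDITION & SPEC =====
-- Pre_ excludes clusters containing duplicate cells, on which A's per-occurrence free-side
-- summation is a multiset artefact the edge-histogram method does not reproduce.
def Pre_count_fence_costs (clusters : List (List (Int × Int))) : Prop :=
  ∀ cluster ∈ clusters, cluster.Nodup
instance (clusters : List (List (Int × Int))) : Decidable (Pre_count_fence_costs clusters) := by unfold Pre_count_fence_costs; infer_instance

def pvWitness_count_fence_costs : (List (List (Int × Int))) := [[(0, 0), (1, 0), (1, 1)], [(5, 5)]]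

def Spec_count_fence_costs (clusters : List (List (Int × Int))) (out : Int) : Prop := out = count_fence_costs_alt clusters
instance (clusters : List (List (Int × Int))) (out : Int) : Decidable (Spec_count_fence_costs clusters out) := by unfold Spec_count_fence_costs; infer_instance

-- ===== CLAIM (what is proved, stated in full; the proofs are below) =====
def Claim_equal_count_fence_costs : Prop := ∀ (clusters : List (List (Int × Int))), Dom_count_fence_costs clusters → Pre_count_fence_costs clusters → Spec_count_fence_costs clusters (count_fence_costs clusters)

-- ===== LEMMAS AND PROOFS =====

-- the four unit edge segments of a cell (as B's Python generates them)
def pvEdges (p : Int × Int) : List (Int × Int × Int) :=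
  [(p.1, p.2, 0), (p.1 + 1, p.2, 0), (p.1, p.2, 1), (p.1, p.2 + 1, 1)]

theorem pv_foldl_add {α : Type} (f : α → Int) (l : List α) (a : Int) :
    l.foldl (fun s x => s + f x) a = a + (l.map f).sum := by
  induction l generalizing a with
  | nil => simp
  | cons x t ih => simp [ih, add_assoc]

-- nested fold over cells and their edges = fold over the flattened edge list
theorem pv_foldl_flat {α β γ : Type} (g : γ → β → γ) (f : α → List β) (l : List α) (d : γ) :
    l.foldl (fun d p => (f p).foldl g d) d = (l.flatMap f).foldl g d := by
  induction l generalizing d with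
  | nil => rfl
  | cons x t ih => simp [List.flatMap_cons, List.foldl_append, ih]

theorem pv_count_flat {α β : Type} [BEq β] (f : α → List β) (l : List α) (e : β) :
    (l.flatMap f).count e = (l.map (fun q => (f q).count e)).sum := by
  induction l with
  | nil => simp
  | cons x t ih => simp [List.flatMap_cons, List.count_append, ih]

theorem pv_countP_flat {α β : Type} (f : α → List β) (l : List α) (p : β → Bool) :
    (l.flatMap f).countP p = (l.map (fun q => (f q).countP p)).sum := by
  induction l with
  | nil => simp
  | cons x t ih => simp [List.flatMap_cons, List.countP_append, ih]

theorem pv_sum_add {α : Type} (l : List α) (f g : α → Nat) :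
    (l.map (fun x => f x + g x)).sum = (l.map f).sum + (l.map g).sum := by
  induction l with
  | nil => simp
  | cons x t ih => simp [ih]; ring

theorem pv_sum_ind {α : Type} [BEq α] [LawfulBEq α] [DecidableEq α] (l : List α) (v : α) :
    (l.map (fun q => if q = v then (1 : Nat) else 0)).sum = l.count v := by
  induction l with
  | nil => simp
  | cons x t ih => by_cases h : x = v <;> simp [h, ih, List.count_cons] <;> omega

theorem pv_count_e0 (q : Int × Int) (x y : Int) :
    (pvEdges q).count (x, y, (0 : Int))
      = (if q = (x, y) then 1 else 0) + (if q = (x - 1, y) then 1 else 0) := by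
  obtain ⟨a, b⟩ := q
  simp only [pvEdges, List.count_cons, List.count_nil, Prod.mk.injEq, Prod.ext_iff]
  split_ifs <;> simp_all <;> omega

theorem pv_count_e1 (q : Int × Int) (x y : Int) :
    (pvEdges q).count (x, y, (1 : Int))
      = (if q = (x, y) then 1 else 0) + (if q = (x, y - 1) then 1 else 0) := by
  obtain ⟨a, b⟩ := q
  simp only [pvEdges, List.count_cons, List.count_nil, Prod.mk.injEq, Prod.ext_iff]
  split_ifs <;> simp_all <;> omega

-- total multiplicity of an edge segment in a cluster's flattened edge list
theorem pv_countE0 (c : List (Int × Int)) (x y : Int) :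
    (c.flatMap pvEdges).count (x, y, (0 : Int)) = c.count (x, y) + c.count (x - 1, y) := by
  rw [pv_count_flat]
  rw [List.map_congr_left (fun q _ => pv_count_e0 q x y)]
  rw [pv_sum_add, pv_sum_ind, pv_sum_ind]

theorem pv_countE1 (c : List (Int × Int)) (x y : Int) :
    (c.flatMap pvEdges).count (x, y, (1 : Int)) = c.count (x, y) + c.count (x, y - 1) := by
  rw [pv_count_flat]
  rw [List.map_congr_left (fun q _ => pv_count_e1 q x y)]
  rw [pv_sum_add, pv_sum_ind, pv_sum_ind]

-- count under Nodup is a membership indicator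
theorem pv_count_nodup {α : Type} [BEq α] [LawfulBEq α] [DecidableEq α] (c : List α) (h : c.Nodup) (v : α) :
    c.count v = if v ∈ c then 1 else 0 := by
  by_cases hv : v ∈ c
  · simp [hv, List.count_eq_one_of_mem h hv]
  · simp [hv, List.count_eq_zero_of_not_mem hv]

theorem pv_count_beq {α : Type} [BEq α] [LawfulBEq α] [DecidableEq α] (a : α) (l : List α) :
    l.count a = @List.count α instBEqOfDecidableEq a l := by
  induction l with
  | nil => rfl
  | cons x t ih => simp [List.count_cons, ih, beq_iff_eq]

-- segments occurring once, counted over distinct segments = counted over all occurrences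
theorem pv_once_dedup {α : Type} [BEq α] [LawfulBEq α] [DecidableEq α] (E D : List α)
    (hn : D.Nodup) (hm : ∀ x, x ∈ D ↔ x ∈ E) :
    (D.filter (fun k => E.count k == 1)).length = E.countP (fun k => E.count k == 1) := by
  have hDF : D.toFinset = E.toFinset := by ext a; simp [hm a]
  have hL : (D.filter (fun k => E.count k == 1)).length
      = (E.toFinset.filter (fun a => E.count a == 1)).card := by
    rw [← List.toFinset_card_of_nodup (hn.filter _), List.toFinset_filter, hDF]
  have hR : E.countP (fun k => E.count k == 1)
      = ∑ a ∈ E.toFinset.filter (fun a => E.count a == 1), (E.filter (fun k => E.count k == 1)).count a := by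
    rw [List.countP_eq_length_filter, ← List.sum_toFinset_count_eq_length, List.toFinset_filter]
    simp only [pv_count_beq]
  rw [hL, hR]
  rw [Finset.card_eq_sum_ones]
  refine Finset.sum_congr rfl (fun a ha => ?_)
  simp only [Finset.mem_filter, List.mem_toFinset, beq_iff_eq] at ha
  rw [List.count_filter (by simp [ha.2])]
  exact ha.2.symm

-- per-cell: boundary segments of p = free sides of p
theorem pv_cell (c : List (Int × Int)) (h : c.Nodup) (p : Int × Int) (hp : p ∈ c) :
    (pvEdges p).countP (fun e => (c.flatMap pvEdges).count e == 1)
      = ([(p.1 + 1, p.2), (p.1 - 1, p.2), (p.1, p.2 + 1), (p.1, p.2 - 1)].filter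
          (fun n => !(decide (n ∈ c)))).length := by
  obtain ⟨x, y⟩ := p
  have e1 : (c.flatMap pvEdges).count (x, y, (0 : Int)) = if (x - 1, y) ∈ c then 2 else 1 := by
    rw [pv_countE0, pv_count_nodup c h, pv_count_nodup c h]
    simp only [hp, if_true]
    split_ifs <;> rfl
  have e2 : (c.flatMap pvEdges).count (x + 1, y, (0 : Int)) = if (x + 1, y) ∈ c then 2 else 1 := by
    have hx : x + 1 - 1 = x := by ring
    rw [pv_countE0, hx, pv_count_nodup c h, pv_count_nodup c h]
    simp only [hp, if_true]
    split_ifs <;> rfl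
  have e3 : (c.flatMap pvEdges).count (x, y, (1 : Int)) = if (x, y - 1) ∈ c then 2 else 1 := by
    rw [pv_countE1, pv_count_nodup c h, pv_count_nodup c h]
    simp only [hp, if_true]
    split_ifs <;> rfl
  have e4 : (c.flatMap pvEdges).count (x, y + 1, (1 : Int)) = if (x, y + 1) ∈ c then 2 else 1 := by
    have hy : y + 1 - 1 = y := by ring
    rw [pv_countE1, hy, pv_count_nodup c h, pv_count_nodup c h]
    simp only [hp, if_true]
    split_ifs <;> rfl
  by_cases hA : (x + 1, y) ∈ c <;> by_cases hB : (x - 1, y) ∈ c <;>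
    by_cases hC : (x, y + 1) ∈ c <;> by_cases hD : (x, y - 1) ∈ c <;>
    simp [pvEdges, List.countP_cons, List.filter, e1, e2, e3, e4, hA, hB, hC, hD]

theorem pv_sum_cast {α : Type} (l : List α) (f : α → Nat) :
    (l.map (fun x => (f x : Int))).sum = ((l.map f).sum : Int) := by
  induction l with
  | nil => simp
  | cons x t ih => simp [ih]

-- per-cluster: A's perimeter = B's perimeter
theorem pv_perim (c : List (Int × Int)) (h : c.Nodup) :
    c.foldl (fun perimeter p =>
        perimeter + (([(p.1 + 1, p.2), (p.1 - 1, p.2), (p.1, p.2 + 1), (p.1, p.2 - 1)].filter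
          (fun n => !(PySem.Set.contains (PySem.Set.ofList c) n))).length : Int)) 0
    = ((((c.foldl (fun d p =>
        [(p.1, p.2, (0 : Int)), (p.1 + 1, p.2, (0 : Int)), (p.1, p.2, (1 : Int)), (p.1, p.2 + 1, (1 : Int))].foldl
          (fun d e => d.insert e (d.getD e 0 + 1)) d) PySem.Dict.empty).values.filter
            (fun v => v == (1 : Int))).length : Int)) := by
  -- B side: the nested fold builds the counter of the flattened edge list
  have hflat : (c.foldl (fun d p =>
        [(p.1, p.2, (0 : Int)), (p.1 + 1, p.2, (0 : Int)), (p.1, p.2, (1 : Int)), (p.1, p.2 + 1, (1 : Int))].foldl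
          (fun d e => d.insert e (d.getD e 0 + 1)) d) PySem.Dict.empty)
      = PySem.Dict.counter (c.flatMap pvEdges) := by
    rw [show (fun (d : PySem.Dict (Int × Int × Int) Int) (p : Int × Int) =>
        [(p.1, p.2, (0 : Int)), (p.1 + 1, p.2, (0 : Int)), (p.1, p.2, (1 : Int)), (p.1, p.2 + 1, (1 : Int))].foldl
          (fun d e => d.insert e (d.getD e 0 + 1)) d)
      = (fun d p => (pvEdges p).foldl (fun d e => d.insert e (d.getD e 0 + 1)) d) from rfl]
    rw [pv_foldl_flat]
    exact PySem.Dict.foldl_insert_getD_add_one_eq_counter _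
  rw [hflat]
  -- B perimeter = number of distinct edge segments of multiplicity 1
  have hvals : (PySem.Dict.counter (c.flatMap pvEdges)).values
      = (PySem.List.dedup (c.flatMap pvEdges)).map (fun k => ((c.flatMap pvEdges).count k : Int)) := by
    simp [PySem.Dict.values, PySem.Dict.items_counter, ← PySem.List.dedup_eq_ofList, Function.comp]
  rw [hvals]
  have hpred : ∀ k : Int × Int × Int,
      ((((c.flatMap pvEdges).count k : Int)) == (1 : Int)) = ((c.flatMap pvEdges).count k == 1) := by
    intro k
    by_cases hk : (c.flatMap pvEdges).count k = 1 <;> simp [hk]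
  have hBlen : (((PySem.List.dedup (c.flatMap pvEdges)).map (fun k => ((c.flatMap pvEdges).count k : Int))).filter
      (fun v => v == (1 : Int))).length
      = ((PySem.List.dedup (c.flatMap pvEdges)).filter (fun k => (c.flatMap pvEdges).count k == 1)).length := by
    rw [List.filter_map]
    rw [List.length_map]
    congr 1
    exact List.filter_congr (fun k _ => hpred k)
  rw [hBlen, pv_once_dedup (c.flatMap pvEdges) (PySem.List.dedup (c.flatMap pvEdges))
    (PySem.List.nodup_dedup _) (fun x => PySem.List.mem_dedup _ x), pv_countP_flat]
  -- A side: fold to a sum of per-cell free-side counts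
  have hS : ∀ n : Int × Int, PySem.Set.contains (PySem.Set.ofList c) n = decide (n ∈ c) := by
    intro n
    rw [Bool.eq_iff_iff]
    simp [PySem.Set.mem_ofList]
  rw [pv_foldl_add]
  simp only [hS]
  rw [List.map_congr_left (fun p (hp : p ∈ c) => congrArg Nat.cast (pv_cell c h p hp).symm)]
  rw [pv_sum_cast]
  omega

theorem pv_fold_eq (clusters : List (List (Int × Int)))
    (hpre : ∀ cluster ∈ clusters, cluster.Nodup) :
    count_fence_costs clusters = count_fence_costs_alt clusters := by
  unfold count_fence_costs count_fence_costs_alt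
  suffices hgen : ∀ a : Int, clusters.foldl (fun tot_cost cluster =>
      let cluster_set := PySem.Set.ofList cluster
      let area : Int := cluster.length
      let perimeter : Int := cluster.foldl (fun perimeter p =>
        let neighbors := [(p.1 + 1, p.2), (p.1 - 1, p.2), (p.1, p.2 + 1), (p.1, p.2 - 1)]
        let free_sides : Int := (neighbors.filter (fun n => !(PySem.Set.contains cluster_set n))).length
        perimeter + free_sides) 0
      tot_cost + area * perimeter) a
    = clusters.foldl (fun tot_cost cluster =>
      let edge_count : PySem.Dict (Int × Int × Int) Int := cluster.foldl (fun d p =>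
        [(p.1, p.2, (0 : Int)), (p.1 + 1, p.2, (0 : Int)), (p.1, p.2, (1 : Int)), (p.1, p.2 + 1, (1 : Int))].foldl
          (fun d e => d.insert e (d.getD e 0 + 1)) d) PySem.Dict.empty
      let perimeter : Int := ((edge_count.values.filter (fun v => v == (1 : Int))).length : Int)
      tot_cost + (cluster.length : Int) * perimeter) a by
    exact hgen 0
  induction clusters with
  | nil => intro a; rfl
  | cons c t ih =>
    intro a
    simp only [List.foldl_cons]
    rw [ih (fun x hx => hpre x (List.mem_cons_of_mem _ hx))]
    congr 1
    rw [pv_perim c (hpre c (List.mem_cons_self ..))]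
    rfl

-- ===== VERDICT (by name: the statement is the Claim_ definition above) =====
theorem count_fence_costs_spec : Claim_equal_count_fence_costs := by
  intro clusters _ hpre
  unfold Spec_count_fence_costs
  exact pv_fold_eq clusters hpre
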